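-- pv_equiv track=rewrite | github.com/ebramanti/cmsi386 | HW #1/pythonwarmup.py | powers_of_two
-- ===== SOURCE A (Python) =====
-- def powers_of_two(max):
--     power, current = 0, 1
--     while True:
--         current = 2 ** power
--         if current > max:
--             break;
--         yield current
--         power += 1
-- ===== SOURCE B (Python) =====
-- def powers_of_two(max):
--     # Two-stage: compute the count of powers of two <= max in closed form
--     # (bit_length: for max >= 1, 2**i <= max iff i < max.bit_length()),
--     # then generate exactly that many powers.
--     k = max.bit_length() if max >= 1 else 0
--     for i in range(k):
--         yield 2 ** i
-- ===== Notes on version B (the rewrite author's own statement) =====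
-- stated objective: alternative
-- what changed: Replaces A's unconditional test-and-break loop by a closed-form count: the number of powers k is computed directly from max.bit_length(), and the k powers are then generated over range(k) without any per-iteration comparison against max.
import Mathlib
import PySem

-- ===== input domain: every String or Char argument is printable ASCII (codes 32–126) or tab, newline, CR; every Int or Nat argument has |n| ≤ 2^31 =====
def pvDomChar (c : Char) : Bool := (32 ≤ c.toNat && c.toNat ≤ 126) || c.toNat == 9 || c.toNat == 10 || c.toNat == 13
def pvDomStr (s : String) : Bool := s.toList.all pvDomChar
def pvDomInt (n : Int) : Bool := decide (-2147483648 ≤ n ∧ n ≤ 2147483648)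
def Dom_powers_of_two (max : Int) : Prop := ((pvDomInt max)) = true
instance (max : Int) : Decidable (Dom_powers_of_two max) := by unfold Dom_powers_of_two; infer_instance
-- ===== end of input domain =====

-- B replaces A's test-and-break loop by a closed-form count (bit_length) followed by
-- generation over range(k) (objective: alternative).

-- ===== PORT A =====
-- A's 'while True' loop: each pass recomputes current = 2 ** power, breaks if current > max,
-- else yields current and increments power. Terminates because 2^power strictly grows.
def powers_of_two_loopA (max : Int) (power : Nat) : List Int :=
  let current : Int := 2 ^ power
  if current > max then [] else current :: powers_of_two_loopA max (power + 1)
termination_by (max + 1 - 2 ^ power).toNat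
decreasing_by
  have h1 : (1:Int) ≤ 2 ^ power := one_le_pow₀ (by norm_num)
  simp only [not_lt] at *
  omega

def powers_of_two (max : Int) : List Int := powers_of_two_loopA max 0

-- ===== PORT B =====
-- Source B: k = max.bit_length() if max >= 1 else 0; then yield 2 ** i for i in range(k).
-- Python's int.bit_length on a nonnegative int is Nat.size (exact on max ≥ 1).
def powers_of_two_alt (max : Int) : List Int :=
  let k : Nat := if 1 ≤ max then Nat.size max.toNat else 0
  (List.range k).map (fun i => (2:Int) ^ i)

-- ===== PRECONDITION & SPEC =====
def Spec_powers_of_two (max : Int) (out : List Int) : Prop := out = powers_of_two_alt max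
instance (max : Int) (out : List Int) : Decidable (Spec_powers_of_two max out) := by unfold Spec_powers_of_two; infer_instance

-- ===== CLAIM =====
def Claim_equal_powers_of_two : Prop := ∀ (max : Int), Dom_powers_of_two max → Spec_powers_of_two max (powers_of_two max)

-- ===== LEMMAS AND PROOFS =====
-- The count k characterizes membership: 2^i ≤ max iff i < k.
theorem altK_iff (max : Int) (i : Nat) :
    (2:Int) ^ i ≤ max ↔ i < (if 1 ≤ max then Nat.size max.toNat else 0) := by
  by_cases h : 1 ≤ max
  · rw [if_pos h]
    have hmax : (max.toNat : Int) = max := Int.toNat_of_nonneg (by omega)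
    rw [← hmax]
    rw [show ((2:Int) ^ i) = ((2 ^ i : Nat) : Int) by push_cast; ring]
    rw [Int.ofNat_le]
    exact (Nat.lt_size).symm
  · rw [if_neg h]
    simp only [Nat.not_lt_zero, iff_false, not_le]
    have h1 : (1:Int) ≤ 2 ^ i := one_le_pow₀ (by norm_num)
    omega

theorem loopA_eq_range' (max : Int) (k : Nat)
    (hk : ∀ i : Nat, (2:Int) ^ i ≤ max ↔ i < k) :
    ∀ (n p : Nat), k = p + n →
      powers_of_two_loopA max p = (List.range' p n).map (fun i => (2:Int) ^ i) := by
  intro n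
  induction n with
  | zero =>
      intro p hp
      rw [powers_of_two_loopA]
      have : ¬ (2:Int) ^ p ≤ max := by rw [hk]; omega
      simp only [List.range', List.map_nil]
      rw [if_pos (by omega)]
  | succ n ih =>
      intro p hp
      rw [powers_of_two_loopA]
      have : (2:Int) ^ p ≤ max := by rw [hk]; omega
      rw [if_neg (by omega), List.range'_succ, List.map_cons]
      rw [ih (p + 1) (by omega)]

-- ===== VERDICT =====
theorem powers_of_two_spec : Claim_equal_powers_of_two := by
  intro max _
  unfold Spec_powers_of_two powers_of_two powers_of_two_alt
  simp only [List.range_eq_range']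
  exact loopA_eq_range' max _ (altK_iff max) _ 0 (by omega)
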